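-- pv_equiv track=rewrite | github.com/Thunderrr2022/Workly_Research_CodematiAi | backend/agents/query_splitter.py | _generic_decomposition
-- ===== SOURCE A (Python) =====
-- from typing import List, Dict, Any, Optional
--
-- def _generic_decomposition(query: str) -> List[str]:
--     """Generic decomposition for queries that don't match specific patterns."""
--     # Extract key terms
--     words = query.lower().split()
--
--     # Remove common words
--     stop_words = {'the', 'a', 'an', 'and', 'or', 'but', 'in', 'on', 'at', 'to', 'for', 'of', 'with', 'by', 'is', 'are', 'was', 'were', 'be', 'been', 'being', 'have', 'has', 'had', 'do', 'does', 'did', 'will', 'would', 'could', 'should', 'may', 'might', 'can', 'what', 'how', 'why', 'when', 'where', 'which', 'who'}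
--     key_terms = [word for word in words if word not in stop_words and len(word) > 1]
--
--     if not key_terms:
--         return [query]  # Return original if no key terms found
--
--     # Handle special cases for common abbreviations
--     expanded_terms = []
--     for term in key_terms:
--         if term == 'ar':
--             expanded_terms.extend(['augmented reality', 'AR'])
--         elif term == 'vr':
--             expanded_terms.extend(['virtual reality', 'VR'])
--         elif term == 'ai':
--             expanded_terms.extend(['artificial intelligence', 'AI'])
--         elif term == 'ml':
--             expanded_terms.extend(['machine learning', 'ML'])
--         else:
--             expanded_terms.append(term)
--
--     # Create generic sub-questions
--     sub_queries = []
--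
--     # What question
--     if 'what' not in query.lower():
--         sub_queries.append(f"What is {expanded_terms[0]} and how does it work?")
--
--     # How question
--     if 'how' not in query.lower():
--         sub_queries.append(f"How does {expanded_terms[0]} function or operate?")
--
--     # Applications question
--     sub_queries.append(f"What are the main applications of {expanded_terms[0]}?")
--
--     # Current state question
--     sub_queries.append(f"What is the current state and development of {expanded_terms[0]}?")
--
--     # Future prospects question
--     sub_queries.append(f"What are the future prospects and trends for {expanded_terms[0]}?")
--
--     return sub_queries
-- ===== SOURCE B (Python) =====
-- from typing import List, Dict, Any, Optional
--
-- _STOP = {'the', 'a', 'an', 'and', 'or', 'but', 'in', 'on', 'at', 'to', 'for', 'of', 'with', 'by', 'is', 'are', 'was', 'were', 'be', 'been', 'being', 'have', 'has', 'had', 'do', 'does', 'did', 'will', 'would', 'could', 'should', 'may', 'might', 'can', 'what', 'how', 'why', 'when', 'where', 'which', 'who'}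
-- _ABBREV = {'ar': 'augmented reality', 'vr': 'virtual reality', 'ai': 'artificial intelligence', 'ml': 'machine learning'}
--
-- def _generic_decomposition(query: str) -> List[str]:
--     """Generic decomposition: single character-level pass finds the first key term
--     (no split(), no keyword list is ever built); only that term is ever used."""
--     ql = query.lower()
--     term = None
--     buf = []
--     for c in ql + ' ':  # sentinel space flushes the last word
--         if c.isspace():
--             if len(buf) > 1 and ''.join(buf) not in _STOP:
--                 term = ''.join(buf)
--                 break
--             buf = []
--         else:
--             buf.append(c)
--     if term is None:
--         return [query]
--     t = _ABBREV.get(term, term)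
--     table = [
--         ('what', f"What is {t} and how does it work?"),
--         ('how', f"How does {t} function or operate?"),
--         (None, f"What are the main applications of {t}?"),
--         (None, f"What is the current state and development of {t}?"),
--         (None, f"What are the future prospects and trends for {t}?"),
--     ]
--     return [q for key, q in table if key is None or key not in ql]
-- ===== Notes on version B (the rewrite author's own statement) =====
-- stated objective: alternative
-- what changed: B never builds A's word list or its expanded_terms list: a single character-level scan with a word buffer (no split()) finds the first surviving key term with an early break, one dict lookup replaces A's expansion loop over every key term, and the five sub-questions come from filtering a declarative question table instead of conditional appends.
import Mathlib
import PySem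

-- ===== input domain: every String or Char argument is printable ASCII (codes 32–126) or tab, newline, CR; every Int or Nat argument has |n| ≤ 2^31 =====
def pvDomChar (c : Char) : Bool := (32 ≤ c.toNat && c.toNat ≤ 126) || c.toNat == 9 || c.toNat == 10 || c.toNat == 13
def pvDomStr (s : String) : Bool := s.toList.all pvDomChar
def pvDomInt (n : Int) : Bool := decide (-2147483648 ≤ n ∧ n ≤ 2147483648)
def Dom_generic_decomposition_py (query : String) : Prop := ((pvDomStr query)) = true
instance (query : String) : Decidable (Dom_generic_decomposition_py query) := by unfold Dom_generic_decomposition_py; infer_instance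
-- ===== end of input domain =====

-- B replaces A's split()-then-filter word pipeline and its full expanded_terms loop by one
-- character-level scan with an early break plus a single dict lookup (objective: alternative).

-- ===== PORT A =====

-- the Python set literal stop_words (distinct elements, insertion order)
def pvStop : List String := PySem.Set.ofList ["the", "a", "an", "and", "or", "but", "in", "on", "at", "to", "for", "of", "with", "by", "is", "are", "was", "were", "be", "been", "being", "have", "has", "had", "do", "does", "did", "will", "would", "could", "should", "may", "might", "can", "what", "how", "why", "when", "where", "which", "who"]

-- the body of A's 'for term in key_terms' expansion loop (if/elif chain, extend/append)
def pvExpandStep (acc : List String) (term : String) : List String :=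
  if term = "ar" then acc ++ ["augmented reality", "AR"]
  else if term = "vr" then acc ++ ["virtual reality", "VR"]
  else if term = "ai" then acc ++ ["artificial intelligence", "AI"]
  else if term = "ml" then acc ++ ["machine learning", "ML"]
  else acc ++ [term]

def generic_decomposition_py (query : String) : List String :=
  let words := PySem.Str.split₀ (PySem.Str.lower query)
  let key_terms := words.filter (fun w => decide (w ∉ pvStop) && decide (1 < PySem.Str.len w))
  if key_terms = [] then [query]
  else
    let expanded_terms := key_terms.foldl pvExpandStep []
    -- expanded_terms[0]; the loop adds ≥ 1 item per key term, so with key_terms ≠ [] the index is in range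
    let e0 := (PySem.List.pyGet? expanded_terms 0).getD ""
    let sub_queries : List String := []
    let sub_queries := if !(PySem.Str.isIn "what" (PySem.Str.lower query)) then sub_queries ++ ["What is " ++ e0 ++ " and how does it work?"] else sub_queries
    let sub_queries := if !(PySem.Str.isIn "how" (PySem.Str.lower query)) then sub_queries ++ ["How does " ++ e0 ++ " function or operate?"] else sub_queries
    let sub_queries := sub_queries ++ ["What are the main applications of " ++ e0 ++ "?"]
    let sub_queries := sub_queries ++ ["What is the current state and development of " ++ e0 ++ "?"]
    let sub_queries := sub_queries ++ ["What are the future prospects and trends for " ++ e0 ++ "?"]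
    sub_queries

-- ===== PORT B =====

-- the Python dict literal _ABBREV
def pvAbbrev : PySem.Dict String String := PySem.Dict.ofList [("ar", "augmented reality"), ("vr", "virtual reality"), ("ai", "artificial intelligence"), ("ml", "machine learning")]

-- Source B's 'if len(buf) > 1 and ''.join(buf) not in _STOP' (buf built by append = cons-to-front here)
def pvAccept (buf : List Char) : Bool :=
  decide (1 < buf.length) && decide (String.ofList buf.reverse ∉ pvStop)

-- Source B's 'for c in ql + " "' loop with its early break: returns the first key term, if any
def pvScan : List Char → List Char → Option String
  | [], _ => none
  | c :: cs, buf =>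
    if PySem.Chars.isspace c then
      if pvAccept buf then some (String.ofList buf.reverse) else pvScan cs []
    else pvScan cs (c :: buf)

def generic_decomposition_py_alt (query : String) : List String :=
  let ql := PySem.Str.lower query
  match pvScan (ql.toList ++ [' ']) [] with
  | none => [query]
  | some term =>
    let t := pvAbbrev.getD term term
    let table : List (Option String × String) :=
      [(some "what", "What is " ++ t ++ " and how does it work?"),
       (some "how", "How does " ++ t ++ " function or operate?"),
       (none, "What are the main applications of " ++ t ++ "?"),
       (none, "What is the current state and development of " ++ t ++ "?"),
       (none, "What are the future prospects and trends for " ++ t ++ "?")]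
    (table.filter (fun p => match p.1 with
      | none => true
      | some k => !(PySem.Str.isIn k ql))).map Prod.snd

-- ===== PRECONDITION & SPEC =====
def Spec_generic_decomposition_py (query : String) (out : List String) : Prop := out = generic_decomposition_py_alt query
instance (query : String) (out : List String) : Decidable (Spec_generic_decomposition_py query out) := by unfold Spec_generic_decomposition_py; infer_instance

-- ===== CLAIM (what is proved, stated in full; the proofs are below) =====
def Claim_equal_generic_decomposition_py : Prop := ∀ (query : String), Dom_generic_decomposition_py query → Spec_generic_decomposition_py query (generic_decomposition_py query)

-- ===== LEMMAS AND PROOFS =====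

-- A's filter predicate over the split words
def pvP : String → Bool := fun w => decide (w ∉ pvStop) && decide (1 < PySem.Str.len w)

theorem pvAccept_eq (buf : List Char) : pvAccept buf = pvP (String.ofList buf.reverse) := by
  unfold pvAccept pvP
  simp [Bool.and_comm]

-- split₀.go's accumulator prepends its (reversed) contents
theorem pvGo_acc (cs : List Char) (cur : List Char) (acc : List (List Char)) :
    PySem.Chars.split₀.go cs cur acc = acc.reverse ++ PySem.Chars.split₀.go cs cur [] := by
  induction cs generalizing cur acc with
  | nil =>
    unfold PySem.Chars.split₀.go
    by_cases h : cur.isEmpty <;> simp [h]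
  | cons c cs ih =>
    unfold PySem.Chars.split₀.go
    by_cases hs : PySem.Chars.isspace c
    · by_cases h : cur.isEmpty
      · simp [hs, h, ih [] acc]
      · simp only [hs, h, if_true, if_false, Bool.false_eq_true]
        rw [ih [] (cur.reverse :: acc), ih [] [cur.reverse]]
        simp
    · simp only [hs, Bool.false_eq_true, if_false]
      rw [ih (c :: cur) acc]

-- the B scanner computes exactly 'first split₀ word passing A's filter'
theorem pvScan_eq_find (cs : List Char) (buf : List Char) :
    pvScan (cs ++ [' ']) buf
      = ((PySem.Chars.split₀.go cs buf []).map String.ofList).find? pvP := by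
  induction cs generalizing buf with
  | nil =>
    unfold pvScan PySem.Chars.split₀.go
    have hsp : PySem.Chars.isspace ' ' = true := by decide
    by_cases h : buf.isEmpty
    · have : buf = [] := by simpa [List.isEmpty_iff] using h
      subst this
      simp [hsp, pvAccept, pvScan]
    · simp only [List.nil_append, hsp, if_true, h, Bool.false_eq_true, if_false]
      rw [pvAccept_eq]
      by_cases hp : pvP (String.ofList buf.reverse) <;> simp [hp, pvScan]
  | cons c cs ih =>
    unfold pvScan PySem.Chars.split₀.go
    by_cases hs : PySem.Chars.isspace c
    · by_cases h : buf.isEmpty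
      · have : buf = [] := by simpa [List.isEmpty_iff] using h
        subst this
        simp only [hs, if_true, List.isEmpty_nil, List.cons_append]
        rw [pvAccept_eq]
        simp [pvP, ih]
      · simp only [hs, if_true, h, Bool.false_eq_true, if_false, List.cons_append]
        rw [pvAccept_eq, pvGo_acc cs [] [buf.reverse]]
        by_cases hp : pvP (String.ofList buf.reverse) <;> simp [hp, ih]
    · simp only [hs, Bool.false_eq_true, if_false, List.cons_append]
      exact ih (c :: buf)

-- the chunk A's loop body appends for one term
def pvChunk (term : String) : List String :=
  if term = "ar" then ["augmented reality", "AR"]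
  else if term = "vr" then ["virtual reality", "VR"]
  else if term = "ai" then ["artificial intelligence", "AI"]
  else if term = "ml" then ["machine learning", "ML"]
  else [term]

theorem pvExpandStep_eq_chunk (acc : List String) (term : String) :
    pvExpandStep acc term = acc ++ pvChunk term := by
  unfold pvExpandStep pvChunk; split_ifs <;> rfl

theorem pvExpanded_eq_flatMap (l : List String) (acc : List String) :
    l.foldl pvExpandStep acc = acc ++ l.flatMap pvChunk := by
  have h : l.foldl pvExpandStep acc = l.foldl (fun acc x => acc ++ pvChunk x) acc := by
    congr 1; funext acc x; exact pvExpandStep_eq_chunk acc x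
  rw [h, PySem.List.foldl_append_eq_flatMap]

-- head of the chunk of the first key term = the abbreviation lookup B performs
theorem pvAbbrev_mk : pvAbbrev = PySem.Dict.mk [("ar", "augmented reality"), ("vr", "virtual reality"), ("ai", "artificial intelligence"), ("ml", "machine learning")] := by decide

theorem pvChunk_head (t : String) : (pvChunk t).head? = some (pvAbbrev.getD t t) := by
  unfold pvChunk
  split_ifs with h1 h2 h3 h4 <;>
    first
    | (subst_vars; rfl)
    | (rw [pvAbbrev_mk, PySem.Dict.getD_eq_get?_getD]
       simp only [PySem.Dict.get?_mk_cons]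
       simp [Ne.symm h1, Ne.symm h2, Ne.symm h3, Ne.symm h4, PySem.Dict.get?])

-- ===== VERDICT (by name: the statement is the Claim_ definition above) =====
set_option maxHeartbeats 1000000 in
theorem generic_decomposition_py_spec : Claim_equal_generic_decomposition_py := by
  intro query _
  unfold Spec_generic_decomposition_py generic_decomposition_py generic_decomposition_py_alt
  set ql := PySem.Str.lower query with hql
  have hscan : pvScan (ql.toList ++ [' ']) []
      = ((PySem.Str.split₀ ql).filter pvP).head? := by
    rw [pvScan_eq_find, List.head?_filter]
    rfl
  simp only [hscan]
  cases hkt : (PySem.Str.split₀ ql).filter pvP with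
  | nil =>
    have hktA : (PySem.Str.split₀ ql).filter
        (fun w => decide (w ∉ pvStop) && decide (1 < PySem.Str.len w)) = [] := hkt
    simp only [hktA, List.head?_nil]
    simp
  | cons t rest =>
    have hkt' : (PySem.Str.split₀ ql).filter
        (fun w => decide (w ∉ pvStop) && decide (1 < PySem.Str.len w)) = t :: rest := hkt
    simp only [List.head?_cons]
    rw [hkt']
    have hne : (t :: rest : List String) ≠ [] := by simp
    simp only [if_neg hne]
    have hexp : (t :: rest).foldl pvExpandStep [] = pvChunk t ++ rest.flatMap pvChunk := by
      rw [pvExpanded_eq_flatMap]; simp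
    have he0 : (PySem.List.pyGet? ((t :: rest).foldl pvExpandStep []) 0).getD ""
        = pvAbbrev.getD t t := by
      rw [hexp]
      have := pvChunk_head t
      cases hc : pvChunk t with
      | nil => rw [hc] at this; simp at this
      | cons a as =>
        rw [hc] at this; simp at this
        have h0 : (0:Int) ≤ (as.length:Int) + (List.map (Nat.cast ∘ fun a => (pvChunk a).length) rest).sum :=
          add_nonneg (by positivity)
            (List.sum_nonneg (by intro x hx; simp at hx; obtain ⟨y, -, rfl⟩ := hx; positivity))
        simp [PySem.List.pyGet?, PySem.List.pyIdx?, this, h0]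
    rw [he0]
    cases hw : PySem.Str.isIn "what" ql <;> cases hh : PySem.Str.isIn "how" ql <;>
      simp only [PySem.Str.isIn_eq] at hw hh <;>
      simp [show PySem.Chars.isIn ['w','h','a','t'] ql.toList = _ from hw,
            show PySem.Chars.isIn ['h','o','w'] ql.toList = _ from hh, List.filter, List.map]
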